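-- pv_equiv track=rewrite | github.com/lyuwen/devrun | devrun/tasks/swe_bench_agentic.py | _compute_shard_ranges
-- ===== SOURCE A (Python) =====
-- def _compute_shard_ranges(
--     start: int, end: int, n: int, pad_width: int
-- ) -> list[str]:
--     """Divide ``[start, end]`` into *n* contiguous chunks.
--
--     Remainder items are distributed one-per-chunk to the earlier chunks.
--     Returns a list of zero-padded range strings.
--     """
--     total = end - start + 1
--     if n <= 0:
--         raise ValueError("Number of shards must be positive")
--     if n > total:
--         raise ValueError(
--             f"Cannot create {n} shards from {total} items (array {start}-{end})"
--         )
--     chunk_size, remainder = divmod(total, n)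
--     ranges: list[str] = []
--     offset = start
--     for i in range(n):
--         size = chunk_size + (1 if i < remainder else 0)
--         chunk_end = offset + size - 1
--         ranges.append(f"{offset:0{pad_width}d}-{chunk_end:0{pad_width}d}")
--         offset = chunk_end + 1
--     return ranges
-- ===== SOURCE B (Python) =====
-- def _compute_shard_ranges(start, end, n, pad_width):
--     total = end - start + 1
--     if n <= 0:
--         raise ValueError("Number of shards must be positive")
--     if n > total:
--         raise ValueError(
--             f"Cannot create {n} shards from {total} items (array {start}-{end})"
--         )
--     chunk_size, remainder = divmod(total, n)
--
--     def fmt(x):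
--         return str(x).zfill(pad_width)
--
--     return [
--         fmt(start + i * chunk_size + min(i, remainder))
--         + "-"
--         + fmt(start + (i + 1) * chunk_size + min(i + 1, remainder) - 1)
--         for i in range(n)
--     ]
-- ===== Notes on version B (the rewrite author's own statement) =====
-- stated objective: alternative
-- what changed: Replaces the accumulator loop that threads a running offset across shards with an independent per-index closed form (offset_i = start + i*chunk_size + min(i, remainder)) mapped over range(n), and pads with str(x).zfill(pad_width) instead of a dynamic format spec.
import Mathlib
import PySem

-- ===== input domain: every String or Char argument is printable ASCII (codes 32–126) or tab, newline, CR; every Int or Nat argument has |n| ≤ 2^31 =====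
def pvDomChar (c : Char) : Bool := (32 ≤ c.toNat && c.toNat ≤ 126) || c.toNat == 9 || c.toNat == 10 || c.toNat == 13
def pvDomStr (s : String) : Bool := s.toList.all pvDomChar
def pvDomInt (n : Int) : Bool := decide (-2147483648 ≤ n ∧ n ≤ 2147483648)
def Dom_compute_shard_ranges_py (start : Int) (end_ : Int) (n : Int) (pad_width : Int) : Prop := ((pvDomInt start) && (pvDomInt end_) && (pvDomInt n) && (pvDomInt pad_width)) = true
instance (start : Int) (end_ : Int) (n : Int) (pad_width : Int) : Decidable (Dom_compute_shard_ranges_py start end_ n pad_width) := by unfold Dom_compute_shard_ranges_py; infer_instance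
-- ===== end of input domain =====

-- B replaces A's running-offset accumulator loop by a per-index closed form
-- (off_i = start + i*chunk + min(i, remainder)) mapped over range(n): same values, different decomposition.

-- ===== PORT A =====
-- literal transliteration of A: foldl over range(n) threading (ranges, offset)
def compute_shard_ranges_py (start : Int) (end_ : Int) (n : Int) (pad_width : Int) : List String :=
  let total := end_ - start + 1
  let chunk_size := PySem.Int.floordiv total n
  let remainder := PySem.Int.mod total n
  let res := (PySem.List.pyRange 0 n 1).foldl
    (fun (st : List String × Int) i =>
      let size := chunk_size + (if i < remainder then (1 : Int) else 0)
      let chunk_end := st.2 + size - 1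
      (st.1 ++ [PySem.Str.zfill (PySem.Int.toStr st.2) pad_width ++ "-" ++
                PySem.Str.zfill (PySem.Int.toStr chunk_end) pad_width],
       chunk_end + 1))
    ([], start)
  res.1

-- ===== PORT B =====
-- B's fmt helper: str(x).zfill(pad_width)
def pvFmtB (x : Int) (w : Int) : String := PySem.Str.zfill (PySem.Int.toStr x) w

def compute_shard_ranges_py_alt (start : Int) (end_ : Int) (n : Int) (pad_width : Int) : List String :=
  let total := end_ - start + 1
  let chunk_size := PySem.Int.floordiv total n
  let remainder := PySem.Int.mod total n
  (PySem.List.pyRange 0 n 1).map (fun i =>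
    pvFmtB (start + i * chunk_size + min i remainder) pad_width ++ "-" ++
    pvFmtB (start + (i + 1) * chunk_size + min (i + 1) remainder - 1) pad_width)

-- ===== PRECONDITION & SPEC =====
-- A raises ValueError when n ≤ 0 or n > total, and its f-string "{x:0{pad_width}d}" raises
-- ValueError for negative pad_width; Pre_ excludes exactly those raising inputs.
def Pre_compute_shard_ranges_py (start : Int) (end_ : Int) (n : Int) (pad_width : Int) : Prop :=
  0 < n ∧ n ≤ end_ - start + 1 ∧ 0 ≤ pad_width
instance (start : Int) (end_ : Int) (n : Int) (pad_width : Int) : Decidable (Pre_compute_shard_ranges_py start end_ n pad_width) := by unfold Pre_compute_shard_ranges_py; infer_instance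

def pvWitness_compute_shard_ranges_py : Int × Int × Int × Int := (0, 9, 3, 2)

def Spec_compute_shard_ranges_py (start : Int) (end_ : Int) (n : Int) (pad_width : Int) (out : List String) : Prop := out = compute_shard_ranges_py_alt start end_ n pad_width
instance (start : Int) (end_ : Int) (n : Int) (pad_width : Int) (out : List String) : Decidable (Spec_compute_shard_ranges_py start end_ n pad_width out) := by unfold Spec_compute_shard_ranges_py; infer_instance

-- ===== CLAIM (what is proved, stated in full; the proofs are below) =====
def Claim_equal_compute_shard_ranges_py : Prop := ∀ (start : Int) (end_ : Int) (n : Int) (pad_width : Int), Dom_compute_shard_ranges_py start end_ n pad_width → Pre_compute_shard_ranges_py start end_ n pad_width → Spec_compute_shard_ranges_py start end_ n pad_width (compute_shard_ranges_py start end_ n pad_width)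

-- ===== LEMMAS AND PROOFS =====

-- Loop invariant: after folding the indices 0..m-1, the accumulator holds exactly B's
-- per-index strings and the offset equals B's closed form start + m*chunk + min m r.
lemma shard_loop (c r start pad : Int) (hr : 0 ≤ r) (m : Nat) :
    ((List.range m).map (fun k : Nat => ((0 : Int) + k))).foldl
      (fun (st : List String × Int) i =>
        (st.1 ++ [PySem.Str.zfill (PySem.Int.toStr st.2) pad ++ "-" ++
                  PySem.Str.zfill (PySem.Int.toStr (st.2 + (c + if i < r then (1 : Int) else 0) - 1)) pad],
         st.2 + (c + if i < r then (1 : Int) else 0) - 1 + 1))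
      ([], start)
    = (((List.range m).map (fun k : Nat => ((0 : Int) + k))).map (fun i =>
        pvFmtB (start + i * c + min i r) pad ++ "-" ++
        pvFmtB (start + (i + 1) * c + min (i + 1) r - 1) pad),
       start + m * c + min (m : Int) r) := by
  induction m with
  | zero => simp; omega
  | succ m ih =>
    rw [List.range_succ, List.map_append, List.foldl_append, List.map_append, ih]
    simp only [List.map_cons, List.map_nil, List.foldl_cons, List.foldl_nil, zero_add,
      Prod.mk.injEq, pvFmtB]
    push_cast
    have e1 : start + (m : Int) * c + min (m : Int) r + (c + if (m : Int) < r then (1 : Int) else 0) - 1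
            = start + ((m : Int) + 1) * c + min ((m : Int) + 1) r - 1 := by
      simp only [add_one_mul, min_def]; split_ifs <;> linarith
    rw [e1]
    exact ⟨rfl, by linarith⟩

-- ===== VERDICT (by name: the statement is the Claim_ definition above) =====
theorem compute_shard_ranges_py_spec : Claim_equal_compute_shard_ranges_py := by
  intro start end_ n pad_width _ hpre
  obtain ⟨hn, hto, hpw⟩ := hpre
  show _ = _
  unfold compute_shard_ranges_py compute_shard_ranges_py_alt
  simp only
  rw [PySem.List.pyRange_one]
  have h0 : ((n : Int) - 0) = n := by ring
  rw [h0]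
  rw [shard_loop _ _ _ _ (PySem.Int.mod_nonneg _ (by omega : (0:Int) < n))]
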